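-- pv_equiv track=rewrite | github.com/vdumchiviy/just_interesting_tasks | codesignal_com/codesignal_com020.py | solution
-- ===== SOURCE A (Python) =====
-- def solution(inputArray):
--     step = 1
--     # obstacles = sorted(inputArray)
--     max_value = max(inputArray)
--     while True:
--         step += 1
--         pos = 0
--         while pos <= max_value:
--             pos += step
--             if pos in inputArray:
--                 break
--         if pos > max_value:
--             return step
-- ===== SOURCE B (Python) =====
-- def solution(inputArray):
--     # Collect every divisor >= 2 of every positive obstacle value by trial
--     # division up to sqrt(x), then return the smallest step >= 2 that is not
--     # a divisor of any obstacle.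
--     bad = set()
--     for x in inputArray:
--         if x > 0:
--             d = 2
--             while d * d <= x:
--                 if x % d == 0:
--                     bad.add(d)
--                     bad.add(x // d)
--                 d += 1
--             if x >= 2:
--                 bad.add(x)
--     step = 2
--     while step in bad:
--         step += 1
--     return step
-- ===== Notes on version B (the rewrite author's own statement) =====
-- stated objective: faster
-- what changed: Instead of testing candidate steps one by one by walking all multiples up to max and scanning the list for each multiple, B enumerates the divisors >= 2 of each positive obstacle once (trial division up to sqrt(x)) into a set and returns the smallest integer >= 2 missing from it.
import Mathlib
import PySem

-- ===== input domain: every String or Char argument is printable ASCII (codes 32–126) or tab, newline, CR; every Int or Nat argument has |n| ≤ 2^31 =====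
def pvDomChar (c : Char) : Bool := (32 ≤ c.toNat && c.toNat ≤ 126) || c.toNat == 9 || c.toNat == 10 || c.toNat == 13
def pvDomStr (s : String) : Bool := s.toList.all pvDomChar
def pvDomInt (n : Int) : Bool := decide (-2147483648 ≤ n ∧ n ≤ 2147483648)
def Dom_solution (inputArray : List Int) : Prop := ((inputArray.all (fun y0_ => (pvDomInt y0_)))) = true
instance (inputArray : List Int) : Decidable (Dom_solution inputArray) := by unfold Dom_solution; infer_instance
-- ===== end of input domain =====

-- B replaces A's per-step walk over all multiples (with a list scan per multiple) by one
-- trial-division pass collecting every divisor >= 2 of each positive value into a set,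
-- then returns the smallest integer >= 2 not in that set.
-- (All loops are ported with a Nat fuel that provably exceeds the loop's iteration count;
-- the fuel is only a totality device, the fuel-0 branch is never reached at the call sites.)

-- ===== PORT A =====
-- inner 'while pos <= max_value' loop of A (d = step); fuel ≥ (maxv + 1 - pos).toNat suffices
def innerA (arr : List Int) (maxv d : Int) : Nat → Int → Int
  | 0, pos => pos
  | fuel + 1, pos =>
    if pos ≤ maxv then
      if (pos + d) ∈ arr then pos + d
      else innerA arr maxv d fuel (pos + d)
    else pos

-- outer 'while True' loop of A; fuel > (maxv + 2 - step).toNat suffices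
def outerA (arr : List Int) (maxv : Int) : Nat → Int → Int
  | 0, step => step
  | fuel + 1, step =>
    if maxv < innerA arr maxv (step + 1) (maxv + 1).toNat 0 then step + 1
    else outerA arr maxv fuel (step + 1)

def solution (inputArray : List Int) : Int :=
  match PySem.List.max? inputArray (fun y => y) with
  | none => 0  -- unreachable under Pre_solution: Python raises ValueError on []
  | some maxv => outerA inputArray maxv ((maxv + 1).toNat + 1) 1

-- ===== PORT B =====
-- 'while d * d <= x' trial-division loop of B; fuel ≥ (x + 1 - d).toNat suffices
def trialDivs (x : Int) : Nat → Int → PySem.Set Int → PySem.Set Int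
  | 0, _, bad => bad
  | fuel + 1, d, bad =>
    if d * d ≤ x then
      trialDivs x fuel (d + 1)
        (if PySem.Int.mod x d = 0 then
           PySem.Set.add (PySem.Set.add bad d) (PySem.Int.floordiv x d)
         else bad)
    else bad

-- 'for x in inputArray' loop of B
def badSetOf (arr : List Int) : PySem.Set Int :=
  arr.foldl
    (fun bad x =>
      if 0 < x then
        (if 2 ≤ x then PySem.Set.add (trialDivs x (x - 1).toNat 2 bad) x
         else trialDivs x (x - 1).toNat 2 bad)
      else bad)
    PySem.Set.empty

-- 'while step in bad' scan of B; fuel > number of elements of bad that are ≥ step suffices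
def scanB (bad : PySem.Set Int) : Nat → Int → Int
  | 0, step => step
  | fuel + 1, step => if step ∈ bad then scanB bad fuel (step + 1) else step

def solution_alt (inputArray : List Int) : Int :=
  scanB (badSetOf inputArray) ((badSetOf inputArray).length + 1) 2

-- ===== PRECONDITION & SPEC =====
-- Pre_ excludes only the empty list, on which A raises ValueError (max() of empty sequence).
def Pre_solution (inputArray : List Int) : Prop := inputArray ≠ []
instance (inputArray : List Int) : Decidable (Pre_solution inputArray) := by unfold Pre_solution; infer_instance
def pvWitness_solution : List Int := ([2, 3, 6, 7])

def Spec_solution (inputArray : List Int) (out : Int) : Prop := out = solution_alt inputArray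
instance (inputArray : List Int) (out : Int) : Decidable (Spec_solution inputArray out) := by unfold Spec_solution; infer_instance

-- ===== CLAIM (what is proved, stated in full; the proofs are below) =====
def Claim_equal_solution : Prop := ∀ (inputArray : List Int), Dom_solution inputArray → Pre_solution inputArray → Spec_solution inputArray (solution inputArray)

-- ===== LEMMAS AND PROOFS =====

-- 'step e is blocked': some positive multiple of e (≤ maxv automatically) is an obstacle
def BadP (arr : List Int) (maxv e : Int) : Prop :=
  ∃ x, x ∈ arr ∧ 0 < x ∧ e ∣ x ∧ x ≤ maxv

lemma innerA_ge (arr : List Int) (maxv d : Int) (hd : 0 < d) :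
    ∀ (fuel : Nat) (pos : Int), (maxv + 1 - pos).toNat ≤ fuel →
      pos ≤ innerA arr maxv d fuel pos ∧
        (pos ≤ maxv → pos + d ≤ innerA arr maxv d fuel pos) := by
  intro fuel
  induction fuel with
  | zero =>
    intro pos hf
    exact ⟨le_refl _, fun h => by omega⟩
  | succ fuel ih =>
    intro pos hf
    rw [innerA]
    by_cases h : pos ≤ maxv
    · rw [if_pos h]
      by_cases hmem : (pos + d) ∈ arr
      · rw [if_pos hmem]; exact ⟨by omega, fun _ => le_refl _⟩
      · rw [if_neg hmem]
        have := (ih (pos + d) (by omega)).1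
        exact ⟨by omega, fun _ => this⟩
    · rw [if_neg h]
      exact ⟨le_refl _, fun h' => absurd h' h⟩

lemma innerA_le_of_dvd (arr : List Int) (maxv d : Int) (hd : 0 < d) (x : Int)
    (hx : x ∈ arr) (hxm : x ≤ maxv) :
    ∀ (fuel : Nat) (pos : Int), (maxv + 1 - pos).toNat ≤ fuel →
      pos < x → d ∣ (x - pos) → innerA arr maxv d fuel pos ≤ x := by
  intro fuel
  induction fuel with
  | zero => intro pos hf hlt _; omega
  | succ fuel ih =>
    intro pos hf hlt hdvd
    have hdle : d ≤ x - pos := Int.le_of_dvd (by omega) hdvd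
    rw [innerA, if_pos (by omega : pos ≤ maxv)]
    by_cases hmem : (pos + d) ∈ arr
    · rw [if_pos hmem]; omega
    · rw [if_neg hmem]
      have hlt' : pos + d < x := by
        rcases lt_or_eq_of_le (show pos + d ≤ x by omega) with h' | h'
        · exact h'
        · exact absurd (h' ▸ hx) hmem
      refine ih (pos + d) (by omega) hlt' ?_
      have heq : x - (pos + d) = (x - pos) - d := by ring
      rw [heq]
      exact dvd_sub hdvd dvd_rfl

lemma innerA_mem_of_le (arr : List Int) (maxv d : Int) (hd : 0 < d) :
    ∀ (fuel : Nat) (pos : Int), (maxv + 1 - pos).toNat ≤ fuel →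
      innerA arr maxv d fuel pos ≤ maxv →
        innerA arr maxv d fuel pos ∈ arr ∧ pos < innerA arr maxv d fuel pos ∧
          d ∣ (innerA arr maxv d fuel pos - pos) := by
  intro fuel
  induction fuel with
  | zero => intro pos hf hle; rw [innerA] at hle ⊢; omega
  | succ fuel ih =>
    intro pos hf hle
    rw [innerA] at hle ⊢
    by_cases h : pos ≤ maxv
    · rw [if_pos h] at hle ⊢
      by_cases hmem : (pos + d) ∈ arr
      · rw [if_pos hmem]
        exact ⟨hmem, by omega, ⟨1, by ring⟩⟩
      · rw [if_neg hmem] at hle ⊢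
        obtain ⟨h1, h2, h3⟩ := ih (pos + d) (by omega) hle
        obtain ⟨k, hk⟩ := h3
        refine ⟨h1, by omega, ⟨k + 1, ?_⟩⟩
        rw [mul_add, mul_one]
        omega
    · rw [if_neg h] at hle ⊢
      exact absurd hle h

lemma outerA_spec (arr : List Int) (maxv : Int) :
    ∀ (fuel : Nat) (step : Int), 0 < step → (maxv + 2 - step).toNat < fuel →
      step < outerA arr maxv fuel step ∧ ¬ BadP arr maxv (outerA arr maxv fuel step) ∧
        ∀ e, step < e → e < outerA arr maxv fuel step → BadP arr maxv e := by
  intro fuel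
  induction fuel with
  | zero => intro step _ hf; omega
  | succ fuel ih =>
    intro step hstep hf
    rw [outerA]
    by_cases h : maxv < innerA arr maxv (step + 1) (maxv + 1).toNat 0
    · rw [if_pos h]
      refine ⟨by omega, ?_, fun e he1 he2 => absurd he2 (by omega)⟩
      rintro ⟨x, hx, hxp, hdvd, hxle⟩
      have := innerA_le_of_dvd arr maxv (step + 1) (by omega) x hx hxle
        (maxv + 1).toNat 0 (by omega) (by omega) (by simpa using hdvd)
      omega
    · rw [if_neg h]
      have hr0 : innerA arr maxv (step + 1) (maxv + 1).toNat 0 ≤ maxv := by omega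
      obtain ⟨hm, hp, hdv⟩ :=
        innerA_mem_of_le arr maxv (step + 1) (by omega) (maxv + 1).toNat 0 (by omega) hr0
      have hbad : BadP arr maxv (step + 1) := ⟨_, hm, by omega, by simpa using hdv, hr0⟩
      have hsle : step + 1 ≤ maxv := by
        have := (innerA_ge arr maxv (step + 1) (by omega) (maxv + 1).toNat 0 (by omega)).2
        by_cases h0 : (0 : Int) ≤ maxv
        · have := this h0; omega
        · omega
      obtain ⟨i1, i2, i3⟩ := ih (step + 1) (by omega) (by omega)
      refine ⟨by omega, i2, fun e he1 he2 => ?_⟩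
      by_cases he : e = step + 1
      · exact he ▸ hbad
      · exact i3 e (by omega) he2

lemma mem_trialDivs (x : Int) (y : Int) :
    ∀ (fuel : Nat) (d : Int) (bad : PySem.Set Int), 2 ≤ d → (x + 1 - d).toNat ≤ fuel →
      (y ∈ trialDivs x fuel d bad ↔
        y ∈ bad ∨ ∃ k, d ≤ k ∧ k * k ≤ x ∧ k ∣ x ∧ (y = k ∨ y = PySem.Int.floordiv x k)) := by
  intro fuel
  induction fuel with
  | zero =>
    intro d bad hd hf
    rw [trialDivs]
    constructor
    · exact Or.inl
    · rintro (hb | ⟨k, hk1, hk2, _, _⟩)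
      · exact hb
      · exfalso
        have h2k : 2 * k ≤ k * k := by nlinarith
        omega
  | succ fuel ih =>
    intro d bad hd hf
    rw [trialDivs]
    by_cases h : d * d ≤ x
    · rw [if_pos h]
      have hdx : d ≤ x := by nlinarith
      by_cases hm : PySem.Int.mod x d = 0
      · have hdvd : d ∣ x := (PySem.Int.mod_eq_zero_iff_dvd x d).mp hm
        rw [if_pos hm, ih (d + 1) _ (by omega) (by omega), PySem.Set.mem_add, PySem.Set.mem_add]
        constructor
        · rintro ((((hb | rfl) | rfl) | ⟨k, hk1, hk2, hk3, hk4⟩))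
          · left; exact hb
          · right; exact ⟨y, le_refl y, h, hdvd, Or.inl rfl⟩
          · right; exact ⟨d, le_refl d, h, hdvd, Or.inr rfl⟩
          · right; exact ⟨k, by omega, hk2, hk3, hk4⟩
        · rintro (hb | ⟨k, hk1, hk2, hk3, hk4⟩)
          · left; left; left; exact hb
          · rcases eq_or_lt_of_le hk1 with rfl | hk1'
            · rcases hk4 with rfl | rfl
              · left; left; right; rfl
              · left; right; rfl
            · right; exact ⟨k, by omega, hk2, hk3, hk4⟩
      · rw [if_neg hm, ih (d + 1) _ (by omega) (by omega)]
        constructor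
        · rintro (hb | ⟨k, hk1, hk2, hk3, hk4⟩)
          · left; exact hb
          · right; exact ⟨k, by omega, hk2, hk3, hk4⟩
        · rintro (hb | ⟨k, hk1, hk2, hk3, hk4⟩)
          · left; exact hb
          · right
            rcases eq_or_lt_of_le hk1 with rfl | hk1'
            · exact absurd ((PySem.Int.mod_eq_zero_iff_dvd x d).mpr hk3) hm
            · exact ⟨k, by omega, hk2, hk3, hk4⟩
    · rw [if_neg h]
      constructor
      · exact Or.inl
      · rintro (hb | ⟨k, hk1, hk2, hk3, _⟩)
        · exact hb
        · exfalso
          have hdk : d * d ≤ k * k := mul_le_mul hk1 hk1 (by omega) (by omega)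
          linarith

lemma mem_divStep (x : Int) (hx : 0 < x) (bad : PySem.Set Int) (y : Int) :
    (y ∈ (if 2 ≤ x then PySem.Set.add (trialDivs x (x - 1).toNat 2 bad) x
          else trialDivs x (x - 1).toNat 2 bad) ↔
      y ∈ bad ∨ (2 ≤ y ∧ y ∣ x)) := by
  have hmt := mem_trialDivs x y (x - 1).toNat 2 bad (le_refl 2) (by omega)
  by_cases h2x : 2 ≤ x
  · rw [if_pos h2x, PySem.Set.mem_add, hmt]
    constructor
    · rintro ((hb | ⟨k, hk1, hk2, hk3, hk4⟩) | rfl)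
      · left; exact hb
      · right
        have hkpos : (0 : Int) < k := by omega
        rcases hk4 with rfl | rfl
        · exact ⟨hk1, hk3⟩
        · constructor
          · have := (PySem.Int.le_floordiv_iff_mul_le (a := x) (b := k) (q := k) hkpos).mpr hk2
            omega
          · rw [PySem.Int.floordiv_eq_ediv_of_pos hkpos]
            obtain ⟨m, rfl⟩ := hk3
            rw [Int.mul_ediv_cancel_left _ (by omega : k ≠ 0)]
            exact ⟨k, mul_comm k m⟩
      · right; exact ⟨h2x, dvd_refl y⟩
    · rintro (hb | ⟨hy2, hydvd⟩)
      · left; left; exact hb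
      · have hyx : y ≤ x := Int.le_of_dvd hx hydvd
        by_cases hyy : y * y ≤ x
        · left; right; exact ⟨y, hy2, hyy, hydvd, Or.inl rfl⟩
        · rcases eq_or_lt_of_le hyx with rfl | hylt
          · right; rfl
          · left; right
            obtain ⟨e, he⟩ := hydvd
            have hepos : (0 : Int) < e := by nlinarith
            have he2 : (2 : Int) ≤ e := by nlinarith
            have helt : e < y := by nlinarith
            refine ⟨e, he2, by nlinarith, ⟨y, by rw [he]; ring⟩, Or.inr ?_⟩
            rw [PySem.Int.floordiv_eq_ediv_of_pos hepos, he, Int.mul_ediv_cancel _ (by omega)]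
  · rw [if_neg h2x, hmt]
    constructor
    · rintro (hb | ⟨k, hk1, hk2, _, _⟩)
      · left; exact hb
      · exfalso; nlinarith
    · rintro (hb | ⟨hy2, hydvd⟩)
      · left; exact hb
      · exfalso
        have := Int.le_of_dvd hx hydvd
        omega

lemma mem_badSetOf (arr : List Int) (y : Int) :
    y ∈ badSetOf arr ↔ ∃ x, x ∈ arr ∧ 0 < x ∧ 2 ≤ y ∧ y ∣ x := by
  have H : ∀ (l : List Int) (bad : PySem.Set Int),
      y ∈ l.foldl
        (fun bad x =>
          if 0 < x then
            (if 2 ≤ x then PySem.Set.add (trialDivs x (x - 1).toNat 2 bad) x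
             else trialDivs x (x - 1).toNat 2 bad)
          else bad)
        bad ↔
      y ∈ bad ∨ ∃ x, x ∈ l ∧ 0 < x ∧ 2 ≤ y ∧ y ∣ x := by
    intro l
    induction l with
    | nil => intro bad; simp
    | cons a t ih =>
      intro bad
      rw [List.foldl_cons, ih]
      by_cases ha : (0 : Int) < a
      · rw [if_pos ha, mem_divStep a ha bad y]
        constructor
        · rintro ((hb | ⟨h1, h2⟩) | ⟨x, hxt, hx1, hx2, hx3⟩)
          · left; exact hb
          · right; exact ⟨a, List.mem_cons_self, ha, h1, h2⟩
          · right; exact ⟨x, List.mem_cons_of_mem a hxt, hx1, hx2, hx3⟩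
        · rintro (hb | ⟨x, hxmem, hx1, hx2, hx3⟩)
          · left; left; exact hb
          · rcases List.mem_cons.mp hxmem with rfl | hxt
            · left; right; exact ⟨hx2, hx3⟩
            · right; exact ⟨x, hxt, hx1, hx2, hx3⟩
      · rw [if_neg ha]
        constructor
        · rintro (hb | ⟨x, hxt, hx1, hx2, hx3⟩)
          · left; exact hb
          · right; exact ⟨x, List.mem_cons_of_mem a hxt, hx1, hx2, hx3⟩
        · rintro (hb | ⟨x, hxmem, hx1, hx2, hx3⟩)
          · left; exact hb
          · rcases List.mem_cons.mp hxmem with rfl | hxt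
            · exact absurd hx1 ha
            · right; exact ⟨x, hxt, hx1, hx2, hx3⟩
  rw [badSetOf, H]
  simp [PySem.Set.empty]

lemma countP_lt_of_mem (l : List Int) (s : Int) (h : s ∈ l) :
    l.countP (fun y => decide (s + 1 ≤ y)) < l.countP (fun y => decide (s ≤ y)) := by
  induction l with
  | nil => cases h
  | cons a t ih =>
    rw [List.countP_cons, List.countP_cons]
    have hle : t.countP (fun y => decide (s + 1 ≤ y)) ≤ t.countP (fun y => decide (s ≤ y)) :=
      List.countP_mono_left (by intro y _ hp; rw [decide_eq_true_eq] at hp ⊢; omega)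
    have hh : (if (decide (s + 1 ≤ a)) = true then 1 else 0) ≤
        (if (decide (s ≤ a)) = true then 1 else 0) := by
      by_cases hc : s + 1 ≤ a
      · rw [if_pos (by rw [decide_eq_true_eq]; omega), if_pos (by rw [decide_eq_true_eq]; omega)]
      · rw [if_neg (by rw [decide_eq_true_eq]; omega)]; omega
    rcases List.mem_cons.mp h with rfl | ht
    · rw [if_neg (by rw [decide_eq_true_eq]; omega), if_pos (by rw [decide_eq_true_eq])]
      omega
    · have := ih ht
      omega

lemma scanB_spec (bad : PySem.Set Int) :
    ∀ (fuel : Nat) (step : Int), bad.countP (fun y => decide (step ≤ y)) < fuel →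
      step ≤ scanB bad fuel step ∧ scanB bad fuel step ∉ bad ∧
        ∀ e, step ≤ e → e < scanB bad fuel step → e ∈ bad := by
  intro fuel
  induction fuel with
  | zero => intro step hf; omega
  | succ fuel ih =>
    intro step hf
    rw [scanB]
    by_cases h : step ∈ bad
    · rw [if_pos h]
      have hlt := countP_lt_of_mem bad step h
      obtain ⟨i1, i2, i3⟩ := ih (step + 1) (by omega)
      refine ⟨by omega, i2, fun e he1 he2 => ?_⟩
      by_cases he : e = step
      · exact he ▸ h
      · exact i3 e (by omega) he2
    · rw [if_neg h]
      exact ⟨le_refl _, h, fun e he1 he2 => absurd he2 (by omega)⟩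

-- ===== VERDICT (by name: the statement is the Claim_ definition above) =====
theorem solution_spec : Claim_equal_solution := by
  unfold Claim_equal_solution
  intro arr _ hpre
  unfold Spec_solution Pre_solution at *
  cases hm : PySem.List.max? arr (fun y => y) with
  | none => exact absurd ((PySem.List.max?_eq_none_iff arr _).mp hm) hpre
  | some maxv =>
    have hmax : ∀ y ∈ arr, y ≤ maxv := by
      have := PySem.List.max?_isMax hm
      simpa using this
    unfold solution
    rw [hm]
    obtain ⟨hA1, hA2, hA3⟩ := outerA_spec arr maxv ((maxv + 1).toNat + 1) 1 (by omega) (by omega)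
    obtain ⟨hB1, hB2, hB3⟩ := scanB_spec (badSetOf arr) ((badSetOf arr).length + 1) 2
      (by have := List.countP_le_length (l := badSetOf arr)
            (p := fun y => decide ((2 : Int) ≤ y)); omega)
    have bridge : ∀ e, 2 ≤ e → (BadP arr maxv e ↔ e ∈ badSetOf arr) := by
      intro e he
      rw [mem_badSetOf]
      constructor
      · rintro ⟨x, hx, hxp, hdvd, _⟩; exact ⟨x, hx, hxp, he, hdvd⟩
      · rintro ⟨x, hx, hxp, _, hdvd⟩; exact ⟨x, hx, hxp, hdvd, hmax x hx⟩
    unfold solution_alt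
    rcases lt_trichotomy (outerA arr maxv ((maxv + 1).toNat + 1) 1)
      (scanB (badSetOf arr) ((badSetOf arr).length + 1) 2) with h | h | h
    · exact absurd ((bridge _ (by omega)).mpr (hB3 _ (by omega) h)) hA2
    · exact h
    · exact absurd ((bridge _ (by omega)).mp (hA3 _ (by omega) h)) hB2
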